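-- pv_equiv track=rewrite | github.com/nbeguier/Guy-De-Cointet | scripts/search_pattern.py | gen_patterns
-- ===== SOURCE A (Python) =====
-- from itertools import product
--
-- def gen_patterns(lines):
--     """Génère toutes les combinaisons de join/no-join aux sauts de ligne."""
--     if len(lines) == 1:
--         yield (), lines[0]
--         return
--     n_breaks = len(lines) - 1
--     for joins in product([False, True], repeat=n_breaks):
--         seq = list(lines[0])
--         for i, join in enumerate(joins):
--             next_line = list(lines[i + 1])
--             if join:
--                 seq = seq[:-1] + [seq[-1] + next_line[0]] + next_line[1:]
--             else:
--                 seq = seq + next_line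
--         yield joins, seq
-- ===== SOURCE B (Python) =====
-- def gen_patterns(lines):
--     """Génère toutes les combinaisons de join/no-join aux sauts de ligne."""
--     if len(lines) == 1:
--         yield (), lines[0]
--         return
--
--     def rec(idx, joins, seq):
--         if idx == len(lines):
--             yield joins, seq
--             return
--         next_line = list(lines[idx])
--         # no-join branch first (product puts False before True, last break fastest)
--         yield from rec(idx + 1, joins + (False,), seq + next_line)
--         merged = seq[:-1] + [seq[-1] + next_line[0]] + next_line[1:]
--         yield from rec(idx + 1, joins + (True,), merged)
--
--     yield from rec(1, (), list(lines[0]))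
-- ===== Notes on version B (the rewrite author's own statement) =====
-- stated objective: alternative
-- what changed: Replaces the itertools.product loop that rebuilds each joined sequence from scratch with a recursive branch over the breaks (no-join branch first, then join) that reuses the shared prefix of work between adjacent combinations; same output order.
import Mathlib
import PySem

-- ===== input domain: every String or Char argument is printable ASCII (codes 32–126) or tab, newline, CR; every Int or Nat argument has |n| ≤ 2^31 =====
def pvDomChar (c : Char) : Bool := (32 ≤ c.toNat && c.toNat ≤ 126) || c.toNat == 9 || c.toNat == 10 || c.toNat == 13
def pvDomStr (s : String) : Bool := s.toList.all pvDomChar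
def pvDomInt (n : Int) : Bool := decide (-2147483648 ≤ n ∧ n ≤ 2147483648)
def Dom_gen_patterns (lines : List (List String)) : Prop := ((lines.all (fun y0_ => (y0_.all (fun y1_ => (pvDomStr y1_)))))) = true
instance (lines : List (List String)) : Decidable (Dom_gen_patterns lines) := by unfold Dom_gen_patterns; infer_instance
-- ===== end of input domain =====

-- B replaces the itertools.product loop (which rebuilds each sequence from
-- scratch) by a branch recursion over the breaks that reuses shared prefixes
-- (an alternative decomposition producing the same output order).


-- ===== PORT A =====
-- itertools.product([False, True], repeat=n): last coordinate varies fastest.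
def pyProdBool : Nat → List (List Bool)
  | 0 => [[]]
  | n + 1 => (pyProdBool n).flatMap (fun js => [js ++ [false], js ++ [true]])

-- one step of A's inner 'for i, join in enumerate(joins)' loop
def gpStepA (lines : List (List String)) (seq : List String) (p : Int × Bool) : List String :=
  let next_line := PySem.List.pyGetD lines (p.1 + 1) []   -- lines[i + 1]
  if p.2 then
    PySem.List.slice seq none (some (-1))
      ++ [PySem.List.pyGetD seq (-1) "" ++ PySem.List.pyGetD next_line 0 ""]
      ++ PySem.List.slice next_line (some 1) none          -- seq[:-1] + [seq[-1]+next[0]] + next[1:]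
  else
    seq ++ next_line

def gen_patterns (lines : List (List String)) : List (List Bool × List String) :=
  if lines.length = 1 then
    [([], PySem.List.pyGetD lines 0 [])]
  else
    let n_breaks := lines.length - 1
    (pyProdBool n_breaks).map (fun joins =>
      (joins, (PySem.List.enumerate joins 0).foldl (gpStepA lines) (PySem.List.pyGetD lines 0 [])))

-- ===== PORT B =====
-- rec(idx, joins, seq) from Source B, as recursion over the remaining lines
def gpAltRec (rest : List (List String)) (joins : List Bool) (seq : List String) :
    List (List Bool × List String) :=
  match rest with
  | [] => [(joins, seq)]
  | next_line :: rs =>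
      gpAltRec rs (joins ++ [false]) (seq ++ next_line) ++
      gpAltRec rs (joins ++ [true])
        (PySem.List.slice seq none (some (-1))
          ++ [PySem.List.pyGetD seq (-1) "" ++ PySem.List.pyGetD next_line 0 ""]
          ++ PySem.List.slice next_line (some 1) none)

def gen_patterns_alt (lines : List (List String)) : List (List Bool × List String) :=
  match lines with
  | [] => []            -- Source B raises here (lines[0]); excluded by Pre_
  | [l] => [([], l)]
  | l :: rest => gpAltRec rest [] l

-- ===== PRECONDITION & SPEC =====
-- Pre_ excludes exactly the inputs where A raises: empty 'lines' (product(repeat=-1)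
-- is a ValueError) and, when there are ≥ 2 lines, any empty line (the join=True
-- combinations hit seq[-1] / next_line[0] on an empty list: IndexError).
def Pre_gen_patterns (lines : List (List String)) : Prop :=
  lines ≠ [] ∧ (lines.length = 1 ∨ ∀ l ∈ lines, l ≠ [])
instance (lines : List (List String)) : Decidable (Pre_gen_patterns lines) := by
  unfold Pre_gen_patterns; infer_instance

def pvWitness_gen_patterns : List (List String) := [["ab", "c"], ["d"], ["e", "f"]]

def Spec_gen_patterns (lines : List (List String)) (out : List (List Bool × List String)) : Prop := out = gen_patterns_alt lines
instance (lines : List (List String)) (out : List (List Bool × List String)) : Decidable (Spec_gen_patterns lines out) := by unfold Spec_gen_patterns; infer_instance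

-- ===== CLAIM (what is proved, stated in full; the proofs are below) =====
def Claim_equal_gen_patterns : Prop := ∀ (lines : List (List String)), Dom_gen_patterns lines → Pre_gen_patterns lines → Spec_gen_patterns lines (gen_patterns lines)

-- ===== LEMMAS AND PROOFS =====

-- the shared merge step, on the actual next line
def mergeStep (seq next_line : List String) (j : Bool) : List String :=
  if j then
    PySem.List.slice seq none (some (-1))
      ++ [PySem.List.pyGetD seq (-1) "" ++ PySem.List.pyGetD next_line 0 ""]
      ++ PySem.List.slice next_line (some 1) none
  else
    seq ++ next_line

def runFold (seq : List String) (pairs : List (Bool × List String)) : List String :=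
  pairs.foldl (fun s p => mergeStep s p.2 p.1) seq

theorem pyProdBool_succ_cons (n : Nat) :
    pyProdBool (n + 1) =
      (pyProdBool n).map (fun js => false :: js) ++ (pyProdBool n).map (fun js => true :: js) := by
  induction n with
  | zero => rfl
  | succ n ih =>
    show (pyProdBool (n + 1)).flatMap _ = _
    conv_lhs => rw [ih]
    simp only [List.flatMap_append, List.flatMap_map]
    congr 1 <;>
      · conv_rhs => rw [pyProdBool, List.map_flatMap]
        simp

-- A's inner loop, re-indexed: folding over enumerate with lines[i+1] lookups
-- equals folding over the zip with the actual tail lines.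
theorem foldA_eq (js : List Bool) :
    ∀ (front rest : List (List String)) (seq : List String),
      front ≠ [] → js.length = rest.length →
      (PySem.List.enumerate js ((front.length : Int) - 1)).foldl (gpStepA (front ++ rest)) seq
        = runFold seq (js.zip rest) := by
  induction js with
  | nil => intro front rest seq _ hlen; simp [PySem.List.enumerate_nil, runFold]
  | cons j js ih =>
    intro front rest seq hf hlen
    cases rest with
    | nil => simp at hlen
    | cons r rs =>
      rw [PySem.List.enumerate_cons]
      have hget : PySem.List.pyGetD (front ++ r :: rs) ((front.length : Int) - 1 + 1) [] = r := by
        have h1 : (front.length : Int) - 1 + 1 = (front.length : Int) := by ring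
        rw [h1, PySem.List.pyGetD_natCast]
        simp [List.getD_eq_getElem?_getD]
      have hstep : gpStepA (front ++ r :: rs) seq ((front.length : Int) - 1, j) = mergeStep seq r j := by
        simp only [gpStepA, mergeStep, hget]
      have hassoc : front ++ r :: rs = (front ++ [r]) ++ rs := by simp
      have hlen' : ((front ++ [r]).length : Int) - 1 = (front.length : Int) - 1 + 1 := by
        simp
      simp only [List.foldl_cons, hstep]
      rw [hassoc, ← hlen', ih (front ++ [r]) rs (mergeStep seq r j) (by simp) (by simpa using hlen)]
      simp [runFold, List.zip_cons_cons]

-- B's recursion produces exactly the product-ordered list of folds.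
theorem gpAltRec_eq (rest : List (List String)) :
    ∀ (joins : List Bool) (seq : List String),
      gpAltRec rest joins seq
        = (pyProdBool rest.length).map (fun js => (joins ++ js, runFold seq (js.zip rest))) := by
  induction rest with
  | nil => intro joins seq; simp [gpAltRec, pyProdBool, runFold]
  | cons r rs ih =>
    intro joins seq
    show gpAltRec rs (joins ++ [false]) (seq ++ r) ++ gpAltRec rs (joins ++ [true]) _ = _
    rw [List.length_cons, pyProdBool_succ_cons, List.map_append, List.map_map, List.map_map,
      ih (joins ++ [false]) (seq ++ r), ih (joins ++ [true]) _]
    congr 1 <;>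
      · refine List.map_congr_left (fun js _ => ?_)
        simp [Function.comp, runFold, List.zip_cons_cons, List.foldl_cons, mergeStep,
          List.append_assoc]

theorem length_mem_pyProdBool {n : Nat} {js : List Bool} (h : js ∈ pyProdBool n) :
    js.length = n := by
  induction n generalizing js with
  | zero => simp [pyProdBool] at h; simp [h]
  | succ n ih =>
    simp only [pyProdBool, List.mem_flatMap, List.mem_cons, List.not_mem_nil, or_false] at h
    obtain ⟨a, ha, hj⟩ := h
    have := ih ha
    rcases hj with hj | hj <;> subst hj <;> simp [this]

-- ===== VERDICT (by name: the statement is the Claim_ definition above) =====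
theorem gen_patterns_spec : Claim_equal_gen_patterns := by
  intro lines _ hpre
  unfold Spec_gen_patterns
  match lines with
  | [] => exact absurd rfl hpre.1
  | [l] =>
      simp [gen_patterns, gen_patterns_alt]
  | l :: r :: rs =>
      have hne : (l :: r :: rs).length ≠ 1 := by simp
      unfold gen_patterns
      rw [if_neg hne]
      show (pyProdBool ((l :: r :: rs).length - 1)).map _ = gen_patterns_alt (l :: r :: rs)
      have hB : gen_patterns_alt (l :: r :: rs) = gpAltRec (r :: rs) [] l := rfl
      rw [hB, gpAltRec_eq]
      have hlen : (l :: r :: rs).length - 1 = (r :: rs).length := by simp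
      rw [hlen]
      refine List.map_congr_left (fun js hjs => ?_)
      have hjl : js.length = (r :: rs).length := length_mem_pyProdBool hjs
      have h0 : PySem.List.pyGetD (l :: r :: rs) 0 [] = l := by
        simp [PySem.List.pyGetD_zero_cons]
      simp only [h0, List.nil_append]
      have heq := foldA_eq js [l] (r :: rs) l (by simp) hjl
      norm_num [List.singleton_append] at heq
      rw [Prod.mk.injEq]
      exact ⟨rfl, by simpa using heq⟩
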